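-- pv_equiv track=rewrite | github.com/rahul38888/coding_practice | src/practices/practice/microsoft_interview_code1.py | solution
-- ===== SOURCE A (Python) =====
-- def solution(buckets: str):
--     # Implement your solution here
--     bs = 0
--     for p in buckets:
--         if p == "B":
--             bs += 1
--
--     if bs == 0:
--         return 0
--
--     r = -1
--     for d in range(0, 2):
--         f = d
--         l = d + 2 * (bs - 1)
--         if l >= len(buckets):
--             break
--
--         may = 0
--         for i in range(f, l + 1, 2):
--             if buckets[i] == "B":
--                 may += 1
--
--         r = max(r, may)
--         l += 2
--         while l < len(buckets):
--             may += buckets[l] == "B"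
--             may -= buckets[f] == "B"
--             r = max(r, may)
--             f += 2
--             l += 2
--
--     return r if r < 0 else (bs-r)
-- ===== SOURCE B (Python) =====
-- def solution(buckets: str):
--     # Prefix-sum re-implementation: split the string into its even- and
--     # odd-indexed slots, build a prefix count of B's per parity, and take the
--     # best window of bs consecutive same-parity slots by prefix differences.
--     bs = sum(c == "B" for c in buckets)
--     if bs == 0:
--         return 0
--
--     even, odd = [], []
--     flip = True
--     for c in buckets:
--         if flip:
--             even.append(c)
--         else:
--             odd.append(c)
--         flip = not flip
--
--     best = -1
--     for slots in (even, odd):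
--         pre = [0]
--         for c in slots:
--             pre.append(pre[-1] + (c == "B"))
--         m = len(slots)
--         for s in range(m - bs + 1):
--             best = max(best, pre[s + bs] - pre[s])
--
--     return -1 if best < 0 else bs - best
-- ===== Notes on version B (the rewrite author's own statement) =====
-- stated objective: alternative
-- what changed: Replaces A's break-driven parity loop with its hand-maintained sliding running count by an explicit parity split of the string plus per-parity prefix-sum arrays, reading each window's B-count as a prefix difference.
import Mathlib
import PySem

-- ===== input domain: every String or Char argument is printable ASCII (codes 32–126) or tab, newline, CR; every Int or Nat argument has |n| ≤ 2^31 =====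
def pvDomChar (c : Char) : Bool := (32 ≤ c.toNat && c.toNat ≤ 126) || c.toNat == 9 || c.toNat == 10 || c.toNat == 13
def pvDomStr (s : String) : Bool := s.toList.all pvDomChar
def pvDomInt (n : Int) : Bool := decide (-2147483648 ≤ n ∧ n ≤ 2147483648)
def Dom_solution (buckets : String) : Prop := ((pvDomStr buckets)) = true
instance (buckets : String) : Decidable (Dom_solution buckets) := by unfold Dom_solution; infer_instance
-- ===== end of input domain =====

-- B replaces A's break-driven parity loop with a hand-maintained sliding running count by a
-- parity split plus per-parity prefix-sum arrays read by prefix differences (objective: alternative).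

-- ===== PORT A =====
-- 'buckets[i]' is ported as pyGetD … ' ': every access A performs is in range (f ≤ l < len), so this is exact.
-- the 'while l < len(buckets)' loop of A
def pvWhileA (cs : List Char) (f l may r : Int) : Int :=
  if h : l < (cs.length : Int) then
    let may' := may + (if PySem.List.pyGetD cs l ' ' = 'B' then 1 else 0)
                    - (if PySem.List.pyGetD cs f ' ' = 'B' then 1 else 0)
    pvWhileA cs (f + 2) (l + 2) may' (max r may')
  else r
termination_by ((cs.length : Int) - l).toNat
decreasing_by omega

-- one iteration of A's 'for d in range(0, 2)' body; 'none' signals the 'break'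
def pvBodyA (cs : List Char) (bs r d : Int) : Option Int :=
  let f := d
  let l := d + 2 * (bs - 1)
  if l ≥ (cs.length : Int) then none
  else
    let may := (PySem.List.pyRange f (l + 1) 2).foldl
      (fun a i => if PySem.List.pyGetD cs i ' ' = 'B' then a + 1 else a) 0
    some (pvWhileA cs f (l + 2) may (max r may))

def solution (buckets : String) : Int :=
  let cs := buckets.toList
  let bs : Int := cs.foldl (fun a p => if p = 'B' then a + 1 else a) 0
  if bs = 0 then 0
  else
    let r : Int := -1
    -- 'for d in range(0, 2)' unrolled to its two iterations; 'none' = break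
    let r := match pvBodyA cs bs r 0 with
      | none => r
      | some r0 =>
        match pvBodyA cs bs r0 1 with
        | none => r0
        | some r1 => r1
    if r < 0 then r else bs - r

-- ===== PORT B =====
-- loop body of Source B's parity split (state: even, odd, flip)
def pvSplitStep (st : List Char × List Char × Bool) (c : Char) : List Char × List Char × Bool :=
  if st.2.2 then (st.1 ++ [c], st.2.1, false) else (st.1, st.2.1 ++ [c], true)

-- 'pre.append(pre[-1] + (c == "B"))'
def pvPreStep (pre : List Int) (c : Char) : List Int :=
  pre ++ [PySem.List.pyGetD pre (-1) 0 + (if c = 'B' then 1 else 0)]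

-- 'for s in range(m - bs + 1): best = max(best, pre[s+bs] - pre[s])'
def pvBestLoop (bs : Int) (pre : List Int) (m best : Int) : Int :=
  (PySem.List.pyRange 0 (m - bs + 1) 1).foldl
    (fun b s => max b (PySem.List.pyGetD pre (s + bs) 0 - PySem.List.pyGetD pre s 0)) best

def solution_alt (buckets : String) : Int :=
  let cs := buckets.toList
  let bs : Int := (cs.map (fun c => if c = 'B' then (1 : Int) else 0)).sum
  if bs = 0 then 0
  else
    let t := cs.foldl pvSplitStep ([], [], true)
    let best : Int := -1
    let best := [t.1, t.2.1].foldl (fun best slots =>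
      pvBestLoop bs (slots.foldl pvPreStep [0]) (slots.length : Int) best) best
    if best < 0 then best else bs - best

-- ===== PRECONDITION & SPEC =====
def Spec_solution (buckets : String) (out : Int) : Prop := out = solution_alt buckets
instance (buckets : String) (out : Int) : Decidable (Spec_solution buckets out) := by unfold Spec_solution; infer_instance

-- ===== CLAIM (what is proved, stated in full; the proofs are below) =====
def Claim_equal_solution : Prop := ∀ (buckets : String), Dom_solution buckets → Spec_solution buckets (solution buckets)

-- ===== LEMMAS AND PROOFS =====

-- 1 on 'B', 0 otherwise
def pvInd (c : Char) : Int := if c = 'B' then 1 else 0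
-- number of B's, as an Int
def pvCB (xs : List Char) : Int := (xs.map pvInd).sum
-- prefix count: B's among the first k slots
def pvP (slots : List Char) (k : Nat) : Int := pvCB (slots.take k)
-- B-count of the window of bs slots starting at t
def pvW (slots : List Char) (bs : Nat) (t : Int) : Int :=
  pvP slots (t + bs).toNat - pvP slots t.toNat

mutual
  def pvEv : List Char → List Char
    | [] => []
    | c :: t => c :: pvOd t
  def pvOd : List Char → List Char
    | [] => []
    | _ :: t => pvEv t
end

lemma pvCB_cons (c : Char) (t : List Char) : pvCB (c :: t) = pvInd c + pvCB t := by
  simp [pvCB]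

lemma pvCB_nonneg (xs : List Char) : 0 ≤ pvCB xs := by
  induction xs with
  | nil => simp [pvCB]
  | cons c t ih =>
    rw [pvCB_cons]
    have : 0 ≤ pvInd c := by unfold pvInd; split <;> omega
    omega

lemma foldl_countB (cs : List Char) : ∀ a : Int,
    cs.foldl (fun a p => if p = 'B' then a + 1 else a) a = a + pvCB cs := by
  induction cs with
  | nil => intro a; simp [pvCB]
  | cons c t ih =>
    intro a
    rw [List.foldl_cons, ih, pvCB_cons]
    unfold pvInd; split <;> omega

lemma sumB_eq (cs : List Char) :
    (cs.map (fun c => if c = 'B' then (1 : Int) else 0)).sum = pvCB cs := rfl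

lemma split_go (cs : List Char) : ∀ e o : List Char,
    cs.foldl pvSplitStep (e, o, true) = (e ++ pvEv cs, o ++ pvOd cs, decide (cs.length % 2 = 0))
    ∧ cs.foldl pvSplitStep (e, o, false) = (e ++ pvOd cs, o ++ pvEv cs, decide (cs.length % 2 = 1)) := by
  induction cs with
  | nil => intro e o; simp [pvEv, pvOd]
  | cons c t ih =>
    intro e o
    constructor
    · rw [List.foldl_cons]
      show List.foldl pvSplitStep (pvSplitStep (e, o, true) c) t = _
      rw [show pvSplitStep (e, o, true) c = (e ++ [c], o, false) from by simp [pvSplitStep]]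
      rw [(ih (e ++ [c]) o).2]
      simp [pvEv, pvOd]
      omega
    · rw [List.foldl_cons]
      show List.foldl pvSplitStep (pvSplitStep (e, o, false) c) t = _
      rw [show pvSplitStep (e, o, false) c = (e, o ++ [c], true) from by simp [pvSplitStep]]
      rw [(ih e (o ++ [c])).1]
      simp [pvEv, pvOd]
      omega

lemma parity_get (cs : List Char) : ∀ k : Nat,
    (pvEv cs)[k]? = cs[2 * k]? ∧ (pvOd cs)[k]? = cs[2 * k + 1]? := by
  induction cs with
  | nil => intro k; simp [pvEv, pvOd]
  | cons c t ih =>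
    intro k
    constructor
    · rw [show pvEv (c :: t) = c :: pvOd t from rfl]
      cases k with
      | zero => simp
      | succ k =>
        have h2 : 2 * (k + 1) = (2 * k + 1) + 1 := by ring
        rw [h2, List.getElem?_cons_succ, List.getElem?_cons_succ, (ih k).2]
    · rw [show pvOd (c :: t) = pvEv t from rfl]
      have h2 : 2 * k + 1 = (2 * k) + 1 := rfl
      rw [h2, List.getElem?_cons_succ, (ih k).1]

lemma parity_len (cs : List Char) :
    (pvEv cs).length = (cs.length + 1) / 2 ∧ (pvOd cs).length = cs.length / 2 := by
  induction cs with
  | nil => simp [pvEv, pvOd]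
  | cons c t ih =>
    rw [show pvEv (c :: t) = c :: pvOd t from rfl, show pvOd (c :: t) = pvEv t from rfl]
    simp only [List.length_cons]
    omega

lemma pre_build (slots : List Char) : ∀ (pref : List Int) (a : Int),
    slots.foldl pvPreStep (pref ++ [a]) = pref ++ slots.scanl (fun x c => x + pvInd c) a := by
  induction slots with
  | nil => intro pref a; simp
  | cons c t ih =>
    intro pref a
    rw [List.foldl_cons, List.scanl_cons]
    rw [show pvPreStep (pref ++ [a]) c = (pref ++ [a]) ++ [a + pvInd c] from by
      simp [pvPreStep, pvInd]]
    rw [ih (pref ++ [a]) (a + pvInd c)]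
    simp

lemma scanl_get (slots : List Char) : ∀ (a : Int) (k : Nat), k ≤ slots.length →
    (slots.scanl (fun x c => x + pvInd c) a)[k]? = some (a + pvP slots k) := by
  induction slots with
  | nil =>
    intro a k hk
    have : k = 0 := by simpa using hk
    subst this
    simp [pvP, pvCB]
  | cons c t ih =>
    intro a k hk
    rw [List.scanl_cons]
    cases k with
    | zero => simp [pvP, pvCB]
    | succ k =>
      rw [List.getElem?_cons_succ, ih (a + pvInd c) k (by simpa using hk)]
      have : pvP (c :: t) (k + 1) = pvInd c + pvP t k := by
        simp [pvP, pvCB]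
      rw [this]
      ring_nf

lemma pvP_zero (slots : List Char) : pvP slots 0 = 0 := by simp [pvP, pvCB]

lemma pvP_succ (slots : List Char) (k : Nat) (h : k < slots.length) :
    pvP slots (k + 1) = pvP slots k + pvInd (slots.getD k ' ') := by
  have hk : slots[k]? = some (slots.getD k ' ') := by
    rw [List.getD_eq_getElem?_getD, List.getElem?_eq_getElem h]; rfl
  unfold pvP
  rw [List.take_add_one, hk]
  simp [pvCB]

lemma pre_get (slots : List Char) (k : Nat) (h : k ≤ slots.length) :
    PySem.List.pyGetD (slots.foldl pvPreStep [0]) (k : Int) 0 = pvP slots k := by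
  have hb := pre_build slots [] 0
  simp only [List.nil_append] at hb
  rw [hb]
  rw [PySem.List.pyGetD_of_nonneg _ _ (by omega)]
  rw [List.getD_eq_getElem?_getD, Int.toNat_natCast]
  rw [scanl_get slots 0 k h]
  simp

lemma bestLoop_eq (slots : List Char) (bs : Nat) (best : Int) :
    pvBestLoop (bs : Int) (slots.foldl pvPreStep [0]) (slots.length : Int) best
      = (PySem.List.pyRange 0 ((slots.length : Int) - bs + 1) 1).foldl
          (fun b t => max b (pvW slots bs t)) best := by
  unfold pvBestLoop
  apply PySem.List.foldl_congr_mem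
  intro acc s hs
  have hm := PySem.List.mem_pyRange_one.mp hs
  lift s to Nat using hm.1
  have hle : s + bs ≤ slots.length := by omega
  have h1 : (s : Int) + (bs : Int) = ((s + bs : Nat) : Int) := by push_cast; ring
  rw [h1, pre_get _ _ hle, pre_get _ _ (by omega)]
  unfold pvW
  congr 2

lemma hGetD (cs slots : List Char) (d : Nat)
    (hget : ∀ k : Nat, slots[k]? = cs[2 * k + d]?) (k : Nat) :
    PySem.List.pyGetD cs ((d : Int) + 2 * (k : Int)) ' ' = slots.getD k ' ' := by
  rw [PySem.List.pyGetD_of_nonneg _ _ (by omega)]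
  have ht : ((d : Int) + 2 * (k : Int)).toNat = 2 * k + d := by omega
  rw [ht, List.getD_eq_getElem?_getD, List.getD_eq_getElem?_getD, ← hget k]

lemma may_init (cs slots : List Char) (d : Nat)
    (hget : ∀ k : Nat, slots[k]? = cs[2 * k + d]?) (bs : Nat) (hbs : 1 ≤ bs)
    (hfit : bs ≤ slots.length) :
    (PySem.List.pyRange (d : Int) ((d : Int) + 2 * ((bs : Int) - 1) + 1) 2).foldl
      (fun a i => if PySem.List.pyGetD cs i ' ' = 'B' then a + 1 else a) 0 = pvP slots bs := by
  have haux : ∀ (b : Nat), b ≤ slots.length → ∀ a : Int,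
      (List.range b).foldl
        (fun (a : Int) (k : Nat) => if PySem.List.pyGetD cs ((d : Int) + 2 * (k : Int)) ' ' = 'B' then a + 1 else a) a
        = a + pvP slots b := by
    intro b
    induction b with
    | zero => intro _ a; simp [pvP_zero]
    | succ b ihb =>
      intro hb a
      rw [List.range_succ, List.foldl_append, ihb (by omega) a, List.foldl_cons, List.foldl_nil]
      rw [hGetD cs slots d hget b, pvP_succ slots b (by omega)]
      unfold pvInd
      split <;> omega
  have hrange : PySem.List.pyRange (d : Int) ((d : Int) + 2 * ((bs : Int) - 1) + 1) 2
      = (List.range bs).map (fun (k : Nat) => (d : Int) + 2 * (k : Int)) := by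
    rw [PySem.List.pyRange_of_pos _ _ (by norm_num)]
    rw [if_pos (by omega)]
    have hc : ((d : Int) + 2 * ((bs : Int) - 1) + 1 - (d : Int) + 2 - 1) / 2 = (bs : Int) := by
      have h2 : ((d : Int) + 2 * ((bs : Int) - 1) + 1 - (d : Int) + 2 - 1) = 2 * (bs : Int) := by ring
      rw [h2, Int.mul_ediv_cancel_left _ (by norm_num)]
    rw [hc]
    simp
  rw [hrange, List.foldl_map, haux bs hfit 0]
  omega

lemma whileA_spec (cs slots : List Char) (d : Nat)
    (hget : ∀ k : Nat, slots[k]? = cs[2 * k + d]?)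
    (hL : ∀ s : Nat, ((d : Int) + 2 * (s : Int) < (cs.length : Int)) ↔ s < slots.length)
    (bs : Nat) (hbs : 1 ≤ bs) :
    ∀ (fuel s : Nat) (r : Int), slots.length - bs - s = fuel → s + bs ≤ slots.length →
    pvWhileA cs ((d : Int) + 2 * s) ((d : Int) + 2 * s + 2 * bs) (pvP slots (s + bs) - pvP slots s) r
      = (PySem.List.pyRange ((s : Int) + 1) ((slots.length : Int) - bs + 1) 1).foldl
          (fun b t => max b (pvW slots bs t)) r := by
  intro fuel
  induction fuel with
  | zero =>
    intro s r hfuel hle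
    rw [pvWhileA]
    rw [dif_neg (by
      rw [show (d : Int) + 2 * (s : Int) + 2 * (bs : Int) = (d : Int) + 2 * ((s + bs : Nat) : Int) from by push_cast; ring]
      rw [hL (s + bs)]
      omega)]
    rw [PySem.List.pyRange_one_eq_nil (by omega), List.foldl_nil]
  | succ fuel ihf =>
    intro s r hfuel hle
    have hlt : s + bs < slots.length := by omega
    rw [pvWhileA]
    rw [dif_pos (by
      rw [show (d : Int) + 2 * (s : Int) + 2 * (bs : Int) = (d : Int) + 2 * ((s + bs : Nat) : Int) from by push_cast; ring]
      rw [hL (s + bs)]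
      omega)]
    have hfc : PySem.List.pyGetD cs ((d : Int) + 2 * (s : Int)) ' ' = slots.getD s ' ' :=
      hGetD cs slots d hget s
    have hlc : PySem.List.pyGetD cs ((d : Int) + 2 * (s : Int) + 2 * (bs : Int)) ' ' = slots.getD (s + bs) ' ' := by
      rw [show (d : Int) + 2 * (s : Int) + 2 * (bs : Int) = (d : Int) + 2 * ((s + bs : Nat) : Int) from by push_cast; ring]
      exact hGetD cs slots d hget (s + bs)
    rw [hfc, hlc]
    have hmay : pvP slots (s + bs) - pvP slots s
          + (if slots.getD (s + bs) ' ' = 'B' then 1 else 0)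
          - (if slots.getD s ' ' = 'B' then 1 else 0)
        = pvP slots (s + 1 + bs) - pvP slots (s + 1) := by
      have e1 := pvP_succ slots (s + bs) hlt
      have e2 := pvP_succ slots s (by omega)
      rw [show s + 1 + bs = (s + bs) + 1 from by ring, e1, e2]
      unfold pvInd at *
      omega
    rw [hmay]
    have harg1 : (d : Int) + 2 * (s : Int) + 2 = (d : Int) + 2 * ((s + 1 : Nat) : Int) := by push_cast; ring
    have harg2 : (d : Int) + 2 * (s : Int) + 2 * (bs : Int) + 2
        = (d : Int) + 2 * ((s + 1 : Nat) : Int) + 2 * (bs : Int) := by push_cast; ring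
    rw [harg1, harg2]
    rw [ihf (s + 1) (max r (pvP slots (s + 1 + bs) - pvP slots (s + 1))) (by omega) (by omega)]
    have hcons : PySem.List.pyRange ((s : Int) + 1) ((slots.length : Int) - (bs : Int) + 1) 1
        = ((s : Int) + 1) :: PySem.List.pyRange ((s : Int) + 1 + 1) ((slots.length : Int) - (bs : Int) + 1) 1 :=
      PySem.List.pyRange_one_cons (by omega)
    rw [hcons, List.foldl_cons]
    have hW : pvW slots bs ((s : Int) + 1) = pvP slots (s + 1 + bs) - pvP slots (s + 1) := by
      unfold pvW
      congr 2
    rw [hW]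
    congr 1

lemma bodyA_eq (cs slots : List Char) (d : Nat)
    (hget : ∀ k : Nat, slots[k]? = cs[2 * k + d]?)
    (hL : ∀ s : Nat, ((d : Int) + 2 * (s : Int) < (cs.length : Int)) ↔ s < slots.length)
    (bs : Nat) (hbs : 1 ≤ bs) (hfit : bs ≤ slots.length) (r : Int) :
    pvBodyA cs (bs : Int) r (d : Int)
      = some ((PySem.List.pyRange 0 ((slots.length : Int) - bs + 1) 1).foldl
          (fun b t => max b (pvW slots bs t)) r) := by
  unfold pvBodyA
  rw [if_neg (by
    rw [show (d : Int) + 2 * ((bs : Int) - 1) = (d : Int) + 2 * ((bs - 1 : Nat) : Int) from by push_cast [hbs]; ring]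
    rw [not_le, hL (bs - 1)]
    omega)]
  rw [may_init cs slots d hget bs hbs hfit]
  show some (pvWhileA cs (d : Int) ((d : Int) + 2 * ((bs : Int) - 1) + 2)
      (pvP slots bs) (max r (pvP slots bs))) = _
  have hw := whileA_spec cs slots d hget hL bs hbs (slots.length - bs) 0
      (max r (pvP slots (0 + bs) - pvP slots 0)) (by omega) (by omega)
  simp only [Nat.cast_zero, mul_zero, add_zero, pvP_zero, sub_zero, zero_add] at hw
  rw [show (d : Int) + 2 * ((bs : Int) - 1) + 2 = (d : Int) + 2 * (bs : Int) from by ring, hw]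
  rw [PySem.List.pyRange_one_cons (a := 0) (b := (slots.length : Int) - (bs : Int) + 1) (by omega)]
  rw [List.foldl_cons]
  have hW : pvW slots bs 0 = pvP slots bs := by
    simp [pvW, pvP_zero]
  rw [hW]
  norm_num

lemma bodyA_none (cs slots : List Char) (d : Nat)
    (hL : ∀ s : Nat, ((d : Int) + 2 * (s : Int) < (cs.length : Int)) ↔ s < slots.length)
    (bs : Nat) (hbs : 1 ≤ bs) (hnofit : slots.length < bs) (r : Int) :
    pvBodyA cs (bs : Int) r (d : Int) = none := by
  unfold pvBodyA
  rw [if_pos (by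
    rw [show (d : Int) + 2 * ((bs : Int) - 1) = (d : Int) + 2 * ((bs - 1 : Nat) : Int) from by push_cast [hbs]; ring]
    rw [ge_iff_le, ← not_lt, hL (bs - 1)]
    omega)]

-- ===== VERDICT (by name: the statement is the Claim_ definition above) =====
theorem solution_spec : Claim_equal_solution := by
  unfold Claim_equal_solution
  intro buckets _
  unfold Spec_solution solution solution_alt
  simp only [foldl_countB _ 0, zero_add, sumB_eq]
  by_cases h0 : pvCB buckets.toList = 0
  · simp [h0]
  · simp only [if_neg h0]
    set cs := buckets.toList with hcs
    obtain ⟨bsN, hbsc⟩ : ∃ n : Nat, pvCB cs = (n : Int) :=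
      ⟨(pvCB cs).toNat, by have := pvCB_nonneg cs; omega⟩
    have hbs1 : 1 ≤ bsN := by
      by_contra h
      apply h0
      rw [hbsc]
      omega
    have hsplit := (split_go cs [] []).1
    simp only [List.nil_append] at hsplit
    rw [hbsc, hsplit]
    simp only [List.foldl_cons, List.foldl_nil]
    rw [bestLoop_eq (pvEv cs) bsN, bestLoop_eq (pvOd cs) bsN]
    have hget0 : ∀ k : Nat, (pvEv cs)[k]? = cs[2 * k + 0]? := fun k => by
      simpa using (parity_get cs k).1
    have hget1 : ∀ k : Nat, (pvOd cs)[k]? = cs[2 * k + 1]? := fun k => (parity_get cs k).2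
    have hlev := (parity_len cs).1
    have hlod := (parity_len cs).2
    have hL0 : ∀ s : Nat, (((0 : Nat) : Int) + 2 * (s : Int) < (cs.length : Int)) ↔ s < (pvEv cs).length := by
      intro s
      rw [hlev]
      push_cast
      omega
    have hL1 : ∀ s : Nat, (((1 : Nat) : Int) + 2 * (s : Int) < (cs.length : Int)) ↔ s < (pvOd cs).length := by
      intro s
      rw [hlod]
      push_cast
      omega
    by_cases hfit0 : bsN ≤ (pvEv cs).length
    · have hb0 := bodyA_eq cs (pvEv cs) 0 hget0 hL0 bsN hbs1 hfit0 (-1)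
      simp only [Nat.cast_zero] at hb0
      simp only [hb0]
      by_cases hfit1 : bsN ≤ (pvOd cs).length
      · have hb1 := bodyA_eq cs (pvOd cs) 1 hget1 hL1 bsN hbs1 hfit1
        simp only [Nat.cast_one] at hb1
        simp only [hb1]
      · have hb1 := bodyA_none cs (pvOd cs) 1 hL1 bsN hbs1 (by omega)
        simp only [Nat.cast_one] at hb1
        simp only [hb1]
        have hnil : PySem.List.pyRange 0 (((pvOd cs).length : Int) - (bsN : Int) + 1) 1 = [] :=
          PySem.List.pyRange_one_eq_nil (by omega)
        rw [hnil, List.foldl_nil]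
    · have hb0 := bodyA_none cs (pvEv cs) 0 hL0 bsN hbs1 (by omega)
      simp only [Nat.cast_zero] at hb0
      simp only [hb0]
      have hnil0 : PySem.List.pyRange 0 (((pvEv cs).length : Int) - (bsN : Int) + 1) 1 = [] :=
        PySem.List.pyRange_one_eq_nil (by omega)
      have hnil1 : PySem.List.pyRange 0 (((pvOd cs).length : Int) - (bsN : Int) + 1) 1 = [] :=
        PySem.List.pyRange_one_eq_nil (by omega)
      rw [hnil0, hnil1, List.foldl_nil, List.foldl_nil]
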